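-- pv_equiv track=rewrite | github.com/RajasriVeeramusti30/geeksforgeeks | Difficulty: Medium/Farthest Smaller Right/farthest-smaller-right.py | farMin
-- ===== SOURCE A (Python) =====
-- def farMin(arr):
--     n = len(arr)
--
--     # Step 1: Build suffix minima array
--     suf = arr[:]   # suf[j] = min(arr[j..n-1])
--     for j in range(n - 2, -1, -1):
--         suf[j] = min(suf[j], suf[j + 1])
--
--     # Step 2: Initialize answer array with -1
--     ans = [-1] * n
--
--     # Step 3: For each index i, binary search farthest j > i
--     for i in range(n - 1):
--         lo, hi, res = i + 1, n - 1, -1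
--         while lo <= hi:
--             mid = (lo + hi) // 2
--             if suf[mid] < arr[i]:
--                 res = mid        # valid candidate
--                 lo = mid + 1     # move right for farther j
--             else:
--                 hi = mid - 1
--         ans[i] = res
--
--     # Step 4: Last index always -1
--     ans[-1] = -1
--     return ans
-- ===== SOURCE B (Python) =====
-- def farMin(arr):
--     n = len(arr)
--     ans = []
--     for i in range(n):
--         res = -1
--         for j in range(n - 1, i, -1):
--             if arr[j] < arr[i]:
--                 res = j
--                 break
--         ans.append(res)
--     return ans
-- ===== Notes on version B (the rewrite author's own statement) =====
-- stated objective: simpler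
-- what changed: Replaces the suffix-minima table plus per-element binary search with a direct right-to-left scan per element that stops at the first smaller value.
-- crash fix: On the empty list A raises IndexError (its trailing ans[-1] = -1); B naturally returns []. — e.g. on farMin([]): A raises IndexError, B returns []
import Mathlib
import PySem

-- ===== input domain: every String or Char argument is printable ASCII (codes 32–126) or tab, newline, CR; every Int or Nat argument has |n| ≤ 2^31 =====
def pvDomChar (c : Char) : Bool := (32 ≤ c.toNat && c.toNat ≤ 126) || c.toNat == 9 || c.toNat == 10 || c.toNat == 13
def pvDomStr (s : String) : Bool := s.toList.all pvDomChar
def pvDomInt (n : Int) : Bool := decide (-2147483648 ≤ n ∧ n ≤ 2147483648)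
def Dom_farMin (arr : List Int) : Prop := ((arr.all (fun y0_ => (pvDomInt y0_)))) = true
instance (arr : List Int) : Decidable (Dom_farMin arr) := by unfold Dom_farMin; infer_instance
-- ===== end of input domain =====

-- B replaces A's suffix-minima table plus per-element binary search with a direct
-- right-to-left scan per element (simpler); on the empty list A raises IndexError
-- (its trailing ans[-1] = -1) while B returns [], so Pre_ excludes [].

-- ===== PORT A =====
-- the 'while lo <= hi' binary-search loop of A, recursion on the shrinking interval
def pvBS (suf : List Int) (x : Int) (lo hi res : Int) : Int :=
  if _h : lo ≤ hi then
    let mid := PySem.Int.floordiv (lo + hi) 2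
    if PySem.List.pyGetD suf mid 0 < x then
      pvBS suf x (mid + 1) hi mid
    else
      pvBS suf x lo (mid - 1) res
  else res
termination_by (hi + 1 - lo).toNat
decreasing_by
  all_goals
    have hb := PySem.Int.floordiv_two_mid_bounds _h
    omega

def farMin (arr : List Int) : List Int :=
  let n : Int := arr.length
  -- Step 1: suffix minima, for j in range(n-2, -1, -1)
  let suf := (PySem.List.pyRange (n - 2) (-1) (-1)).foldl
      (fun s j =>
        PySem.List.pySetD s j (min (PySem.List.pyGetD s j 0) (PySem.List.pyGetD s (j + 1) 0))) arr
  -- Steps 2-3: ans = [-1]*n, then for i in range(n-1): binary search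
  let ans := (PySem.List.pyRange 0 (n - 1) 1).foldl
      (fun a i =>
        PySem.List.pySetD a i (pvBS suf (PySem.List.pyGetD arr i 0) (i + 1) (n - 1) (-1)))
      (List.replicate arr.length (-1))
  -- Step 4: ans[-1] = -1
  PySem.List.pySetD ans (-1) (-1)

-- ===== PORT B =====
-- B's inner 'for j in range(n-1, i, -1): if arr[j] < arr[i]: res = j; break' loop
def pvScan (arr : List Int) (x : Int) : List Int → Int
  | [] => -1
  | j :: js => if PySem.List.pyGetD arr j 0 < x then j else pvScan arr x js

def farMin_alt (arr : List Int) : List Int :=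
  let n : Int := arr.length
  (PySem.List.pyRange 0 n 1).foldl
    (fun ans i =>
      ans ++ [pvScan arr (PySem.List.pyGetD arr i 0) (PySem.List.pyRange (n - 1) i (-1))]) []

-- ===== PRECONDITION & SPEC =====
-- Pre_ excludes exactly the empty list, on which A's trailing 'ans[-1] = -1' raises IndexError.
def Pre_farMin (arr : List Int) : Prop := arr ≠ []
instance (arr : List Int) : Decidable (Pre_farMin arr) := by unfold Pre_farMin; infer_instance
def pvWitness_farMin : List Int := [3, 1, 4, 1, 5]

-- On the empty list A raises IndexError (its trailing ans[-1] = -1); B naturally returns [].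
def Raises_farMin (arr : List Int) : Prop := arr = []
instance (arr : List Int) : Decidable (Raises_farMin arr) := by unfold Raises_farMin; infer_instance
def pvRaiseWitness_farMin : List Int := []
def pvRaiseWitnessOut_farMin : List Int := []

def Spec_farMin (arr : List Int) (out : List Int) : Prop := out = farMin_alt arr
instance (arr : List Int) (out : List Int) : Decidable (Spec_farMin arr out) := by unfold Spec_farMin; infer_instance

-- ===== CLAIM (what is proved, stated in full; the proofs are below) =====
def Claim_equal_farMin : Prop := ∀ (arr : List Int), Dom_farMin arr → Pre_farMin arr → Spec_farMin arr (farMin arr)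
def Claim_raises_farMin : Prop := (∀ (arr : List Int), Dom_farMin arr → Raises_farMin arr → ¬ Pre_farMin arr) ∧ (Dom_farMin (pvRaiseWitness_farMin) ∧ Raises_farMin (pvRaiseWitness_farMin) ∧ farMin_alt (pvRaiseWitness_farMin) = pvRaiseWitnessOut_farMin)

-- ===== LEMMAS AND PROOFS =====

-- countdown ranges: cons and nil forms (pyRange_neg_one gives only the map form)
lemma pvRange_neg_one_cons (a b : Int) (h : b < a) :
    PySem.List.pyRange a b (-1) = a :: PySem.List.pyRange (a - 1) b (-1) := by
  rw [PySem.List.pyRange_neg_one, PySem.List.pyRange_neg_one]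
  have h1 : (a - b).toNat = (a - 1 - b).toNat + 1 := by omega
  rw [h1, List.range_succ_eq_map, List.map_cons, List.map_map]
  refine List.cons_eq_cons.mpr ⟨by simp, ?_⟩
  exact List.map_congr_left (fun k _ => by simp [Function.comp]; omega)
lemma pvRange_neg_one_nil (a b : Int) (h : a ≤ b) :
    PySem.List.pyRange a b (-1) = [] := by
  rw [PySem.List.pyRange_neg_one]
  have h1 : (a - b).toNat = 0 := by omega
  rw [h1]; rfl

-- reading a just-written cell (total forms, indices in range)
lemma pvGetD_pySetD (L : List Int) (a j v : Int) (ha0 : 0 ≤ a) (ha : a < (L.length : Int))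
    (hj : 0 ≤ j) :
    PySem.List.pyGetD (PySem.List.pySetD L a v) j 0 =
      if j = a then v else PySem.List.pyGetD L j 0 := by
  rw [PySem.List.pySetD_of_nonneg _ _ ha0]
  by_cases hlt : j < (L.length : Int)
  · rw [PySem.List.pyGetD_eq_getElem _ _ hj (by simpa using hlt),
        PySem.List.pyGetD_eq_getElem _ _ hj (by simpa using hlt)]
    rw [List.getElem_set]
    have heq : a.toNat = j.toNat ↔ j = a := by omega
    simp only [heq]

  · have hij : ¬ (j = a) := by omega
    rw [if_neg hij]
    have h1 : PySem.List.pyGetD (L.set a.toNat v) j 0 = 0 := by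
      simp only [PySem.List.pyGetD, PySem.List.pyGet?, PySem.List.pyIdx?, if_pos hj,
        List.length_set]
      rw [if_neg (by omega)]
      rfl
    have h2 : PySem.List.pyGetD L j 0 = 0 := by
      simp only [PySem.List.pyGetD, PySem.List.pyGet?, PySem.List.pyIdx?, if_pos hj]
      rw [if_neg (by omega)]
      rfl
    rw [h1, h2]
lemma pvSetD_neg_one (xs : List Int) (v : Int) (h : xs ≠ []) :
    PySem.List.pySetD xs (-1) v = xs.set (xs.length - 1) v := by
  have hn : (0:Int) < xs.length := by simpa using List.length_pos_iff.mpr h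
  simp only [PySem.List.pySetD, PySem.List.pySet?, PySem.List.pyIdx?]
  rw [if_neg (by omega), if_pos (by omega)]
  simp

-- suffix-minima loop invariant: after the fold every cell j holds min(arr[j..n-1])
def pvMinProp (arr L : List Int) (j : Int) : Prop :=
  (∃ k : Int, j ≤ k ∧ k < (arr.length : Int) ∧
      PySem.List.pyGetD L j 0 = PySem.List.pyGetD arr k 0) ∧
  (∀ k : Int, j ≤ k → k < (arr.length : Int) →
      PySem.List.pyGetD L j 0 ≤ PySem.List.pyGetD arr k 0)

lemma pvSuf_build (arr : List Int) :
    ∀ (a : Int) (L : List Int), a ≤ (arr.length : Int) - 2 →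
    L.length = arr.length →
    (∀ j : Int, 0 ≤ j → a < j → j < (arr.length : Int) → pvMinProp arr L j) →
    (∀ j : Int, 0 ≤ j → j ≤ a → PySem.List.pyGetD L j 0 = PySem.List.pyGetD arr j 0) →
    ((PySem.List.pyRange a (-1) (-1)).foldl
        (fun s j =>
          PySem.List.pySetD s j (min (PySem.List.pyGetD s j 0) (PySem.List.pyGetD s (j + 1) 0)))
        L).length = arr.length ∧
    ∀ j : Int, 0 ≤ j → j < (arr.length : Int) →
      pvMinProp arr ((PySem.List.pyRange a (-1) (-1)).foldl
        (fun s j =>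
          PySem.List.pySetD s j (min (PySem.List.pyGetD s j 0) (PySem.List.pyGetD s (j + 1) 0)))
        L) j := by
  intro a
  induction hd : (a + 1).toNat generalizing a with
  | zero =>
    intro L ha hlen hup hdown
    rw [pvRange_neg_one_nil _ _ (by omega)]
    exact ⟨hlen, fun j hj0 hjn => hup j hj0 (by omega) hjn⟩
  | succ m ih =>
    intro L ha hlen hup hdown
    have ha0 : 0 ≤ a := by omega
    have hn2 : a < (arr.length : Int) - 1 := by omega
    rw [pvRange_neg_one_cons _ _ (by omega)]
    simp only [List.foldl_cons]
    set v := min (PySem.List.pyGetD L a 0) (PySem.List.pyGetD L (a + 1) 0) with hv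
    have haL : a < (L.length : Int) := by omega
    have hLa : PySem.List.pyGetD L a 0 = PySem.List.pyGetD arr a 0 := hdown a ha0 le_rfl
    have hMa1 : pvMinProp arr L (a + 1) := hup (a + 1) (by omega) (by omega) (by omega)
    have hget : ∀ j : Int, 0 ≤ j →
        PySem.List.pyGetD (PySem.List.pySetD L a v) j 0 =
          if j = a then v else PySem.List.pyGetD L j 0 :=
      fun j hj => pvGetD_pySetD L a j v ha0 haL hj
    refine ih (a - 1) (by omega) (PySem.List.pySetD L a v) (by omega)
      (by rw [PySem.List.length_pySetD]; exact hlen) ?_ ?_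
    · -- indices above a-1 have pvMinProp in the updated list
      intro j hj0 hja hjn
      by_cases hje : j = a
      · subst hje
        constructor
        · rcases hMa1.1 with ⟨k, hk1, hk2, hk3⟩
          rw [hget j hj0, if_pos rfl, hv]
          rcases le_total (PySem.List.pyGetD L j 0) (PySem.List.pyGetD L (j + 1) 0) with hle | hle
          · exact ⟨j, le_rfl, by omega, by rw [min_eq_left hle, hLa]⟩
          · exact ⟨k, by omega, hk2, by rw [min_eq_right hle, hk3]⟩
        · intro k hk1 hk2
          rw [hget j hj0, if_pos rfl, hv]
          by_cases hke : k = j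
          · subst hke
            rw [← hLa]
            exact min_le_left _ _
          · calc min (PySem.List.pyGetD L j 0) (PySem.List.pyGetD L (j + 1) 0)
                ≤ PySem.List.pyGetD L (j + 1) 0 := min_le_right _ _
              _ ≤ PySem.List.pyGetD arr k 0 := hMa1.2 k (by omega) hk2
      · have hMj := hup j hj0 (by omega) hjn
        constructor
        · rcases hMj.1 with ⟨k, hk1, hk2, hk3⟩
          exact ⟨k, hk1, hk2, by rw [hget j hj0, if_neg hje]; exact hk3⟩
        · intro k hk1 hk2
          rw [hget j hj0, if_neg hje]
          exact hMj.2 k hk1 hk2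
    · -- indices at most a-1 still hold arr's values
      intro j hj0 hja
      rw [hget j hj0, if_neg (by omega)]
      exact hdown j hj0 (by omega)

-- the answer-filling loop: a fold of in-range pySetD writes f i at each i of the range
lemma pvFoldl_set_spec (f : Int → Int) (b : Int) :
    ∀ (a : Int) (L : List Int), 0 ≤ a → b ≤ (L.length : Int) →
    ((PySem.List.pyRange a b 1).foldl (fun acc i => PySem.List.pySetD acc i (f i)) L).length
        = L.length ∧
    ∀ j : Int, 0 ≤ j →
      PySem.List.pyGetD ((PySem.List.pyRange a b 1).foldl
          (fun acc i => PySem.List.pySetD acc i (f i)) L) j 0 =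
        if a ≤ j ∧ j < b then f j else PySem.List.pyGetD L j 0 := by
  intro a
  induction hd : (b - a).toNat generalizing a with
  | zero =>
    intro L ha hb
    rw [PySem.List.pyRange_one_eq_nil (by omega)]
    refine ⟨rfl, fun j hj => ?_⟩
    rw [if_neg (by omega)]
    rfl
  | succ m ih =>
    intro L ha hb
    rw [PySem.List.pyRange_one_cons (by omega)]
    simp only [List.foldl_cons]
    have hlen : (PySem.List.pySetD L a (f a)).length = L.length :=
      PySem.List.length_pySetD L a (f a)
    obtain ⟨ihlen, ihget⟩ := ih (a + 1) (by omega) (PySem.List.pySetD L a (f a))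
      (by omega) (by omega)
    refine ⟨by omega, fun j hj => ?_⟩
    rw [ihget j hj]
    by_cases h1 : a + 1 ≤ j ∧ j < b
    · rw [if_pos h1, if_pos (by omega)]
    · rw [if_neg h1, pvGetD_pySetD L a j (f a) ha (by omega) hj]
      by_cases h2 : j = a
      · rw [if_pos h2, if_pos (by omega), h2]
      · rw [if_neg h2, if_neg (by omega)]

-- monotone-predicate chain for the binary search
lemma pvChain (suf : List Int) (x i0 hi0 : Int)
    (Hmono : ∀ j : Int, i0 ≤ j → j < hi0 →
      PySem.List.pyGetD suf (j + 1) 0 < x → PySem.List.pyGetD suf j 0 < x) :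
    ∀ (j k : Int), i0 ≤ j → j ≤ k → k ≤ hi0 →
      PySem.List.pyGetD suf k 0 < x → PySem.List.pyGetD suf j 0 < x := by
  intro j k
  induction hd : (k - j).toNat generalizing j with
  | zero =>
    intro h1 h2 h3 hq
    have : j = k := by omega
    rwa [this]
  | succ m ih =>
    intro h1 h2 h3 hq
    have hjk : j < k := by omega
    exact Hmono j h1 (by omega) (ih (j + 1) (by omega) (by omega) (by omega) (by omega) hq)

-- binary-search characterisation: pvBS returns the greatest index of [i0,hi0] whose
-- suffix-minimum is < x, or -1 (given invariants on lo/hi/res)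
lemma pvBS_char (suf : List Int) (x i0 hi0 : Int)
    (Hmono : ∀ j : Int, i0 ≤ j → j < hi0 →
      PySem.List.pyGetD suf (j + 1) 0 < x → PySem.List.pyGetD suf j 0 < x) :
    ∀ (lo hi res : Int), i0 ≤ lo → hi ≤ hi0 → lo ≤ hi + 1 →
    ((res = -1 ∧ lo = i0) ∨ (res = lo - 1 ∧ i0 ≤ res ∧ PySem.List.pyGetD suf res 0 < x)) →
    (∀ j : Int, hi < j → j ≤ hi0 → ¬ PySem.List.pyGetD suf j 0 < x) →
    (pvBS suf x lo hi res = -1 ∧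
        ∀ j : Int, i0 ≤ j → j ≤ hi0 → ¬ PySem.List.pyGetD suf j 0 < x) ∨
    (i0 ≤ pvBS suf x lo hi res ∧ pvBS suf x lo hi res ≤ hi0 ∧
        PySem.List.pyGetD suf (pvBS suf x lo hi res) 0 < x ∧
        ∀ j : Int, pvBS suf x lo hi res < j → j ≤ hi0 → ¬ PySem.List.pyGetD suf j 0 < x) := by
  intro lo hi res
  induction lo, hi, res using pvBS.induct suf x with
  | case1 lo hi res hle mid hq ih =>
    intro h1 h2 h3 hres hhi
    have hmid := PySem.Int.floordiv_two_mid_bounds hle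
    have hq' : PySem.List.pyGetD suf (PySem.Int.floordiv (lo + hi) 2) 0 < x := hq
    rw [pvBS, dif_pos hle]
    simp only [if_pos hq']
    exact ih (by omega) h2 (by omega)
      (Or.inr ⟨by omega, by omega, hq⟩) hhi
  | case2 lo hi res hle mid hq ih =>
    intro h1 h2 h3 hres hhi
    have hmid := PySem.Int.floordiv_two_mid_bounds hle
    have hq' : ¬ PySem.List.pyGetD suf (PySem.Int.floordiv (lo + hi) 2) 0 < x := hq
    rw [pvBS, dif_pos hle]
    simp only [if_neg hq']
    refine ih h1 (by omega) (by omega) hres (fun j hj1 hj2 => ?_)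
    by_cases hjh : hi < j
    · exact hhi j hjh hj2
    · intro hqj
      exact hq' (pvChain suf x i0 hi0 Hmono _ j (by omega) (by omega) (by omega) hqj)
  | case3 lo hi res hle =>
    intro h1 h2 h3 hres hhi
    rw [pvBS, dif_neg hle]
    rcases hres with ⟨he, hlo⟩ | ⟨he, hi0le, hq⟩
    · refine Or.inl ⟨he, fun j hj1 hj2 => ?_⟩
      by_cases hjh : hi < j
      · exact hhi j hjh hj2
      · omega
    · refine Or.inr ⟨hi0le, by omega, hq, fun j hj1 hj2 => ?_⟩
      exact hhi j (by omega) hj2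

-- B's scan characterisation: first index from the top of (b,hi] with arr[j] < x, else -1
lemma pvScan_char (arr : List Int) (x b : Int) :
    ∀ hi : Int,
    (pvScan arr x (PySem.List.pyRange hi b (-1)) = -1 ∧
        ∀ j : Int, b < j → j ≤ hi → ¬ PySem.List.pyGetD arr j 0 < x) ∨
    (b < pvScan arr x (PySem.List.pyRange hi b (-1)) ∧
        pvScan arr x (PySem.List.pyRange hi b (-1)) ≤ hi ∧
        PySem.List.pyGetD arr (pvScan arr x (PySem.List.pyRange hi b (-1))) 0 < x ∧
        ∀ j : Int, pvScan arr x (PySem.List.pyRange hi b (-1)) < j → j ≤ hi →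
          ¬ PySem.List.pyGetD arr j 0 < x) := by
  intro hi
  induction hd : (hi - b).toNat generalizing hi with
  | zero =>
    rw [pvRange_neg_one_nil _ _ (by omega)]
    exact Or.inl ⟨rfl, fun j h1 h2 => by omega⟩
  | succ m ih =>
    rw [pvRange_neg_one_cons _ _ (by omega)]
    simp only [pvScan]
    by_cases hq : PySem.List.pyGetD arr hi 0 < x
    · rw [if_pos hq]
      exact Or.inr ⟨by omega, le_refl _, hq, fun j h1 h2 => by omega⟩
    · rw [if_neg hq]
      rcases ih (hi - 1) (by omega) with ⟨he, hall⟩ | ⟨h1, h2, h3, h4⟩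
      · refine Or.inl ⟨he, fun j hj1 hj2 => ?_⟩
        by_cases hjhi : j = hi
        · rwa [hjhi]
        · exact hall j hj1 (by omega)
      · refine Or.inr ⟨h1, by omega, h3, fun j hj1 hj2 => ?_⟩
        by_cases hjhi : j = hi
        · rwa [hjhi]
        · exact h4 j hj1 (by omega)


-- the suffix-minima table produced by A's first loop, named for the proofs
def pvSuf (arr : List Int) : List Int :=
  (PySem.List.pyRange ((arr.length : Int) - 2) (-1) (-1)).foldl
    (fun s j =>
      PySem.List.pySetD s j (min (PySem.List.pyGetD s j 0) (PySem.List.pyGetD s (j + 1) 0))) arr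

-- for each i the binary search over suffix minima and the right-to-left scan agree
lemma pvBridge (arr suf : List Int) (i : Int)
    (h0 : 0 ≤ i) (h1 : i < (arr.length : Int) - 1)
    (sufM : ∀ j : Int, 0 ≤ j → j < (arr.length : Int) → pvMinProp arr suf j) :
    pvBS suf (PySem.List.pyGetD arr i 0) (i + 1) ((arr.length : Int) - 1) (-1) =
      pvScan arr (PySem.List.pyGetD arr i 0)
        (PySem.List.pyRange ((arr.length : Int) - 1) i (-1)) := by
  set n : Int := (arr.length : Int) with hn
  set x : Int := PySem.List.pyGetD arr i 0 with hx
  have Hmono : ∀ j : Int, i + 1 ≤ j → j < n - 1 →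
      PySem.List.pyGetD suf (j + 1) 0 < x → PySem.List.pyGetD suf j 0 < x := by
    intro j hj1 hj2 hq
    rcases (sufM (j + 1) (by omega) (by omega)).1 with ⟨k, hk1, hk2, hk3⟩
    have := (sufM j (by omega) (by omega)).2 k (by omega) hk2
    omega
  have hbs := pvBS_char suf x (i + 1) (n - 1) Hmono (i + 1) (n - 1) (-1)
    le_rfl le_rfl (by omega) (Or.inl ⟨rfl, rfl⟩) (fun j hj1 hj2 => by omega)
  have hsc := pvScan_char arr x i (n - 1)
  have AtoS : ∀ j k : Int, 0 ≤ j → j ≤ k → k < n →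
      PySem.List.pyGetD arr k 0 < x → PySem.List.pyGetD suf j 0 < x := by
    intro j k hj hk hkn hq
    have := (sufM j hj (by omega)).2 k hk hkn
    omega
  have StoA : ∀ j : Int, 0 ≤ j → j < n → PySem.List.pyGetD suf j 0 < x →
      ∃ k : Int, j ≤ k ∧ k < n ∧ PySem.List.pyGetD arr k 0 < x := by
    intro j hj hjn hq
    rcases (sufM j hj hjn).1 with ⟨k, hk1, hk2, hk3⟩
    exact ⟨k, hk1, hk2, by omega⟩
  rcases hbs with ⟨hb, hball⟩ | ⟨hb1, hb2, hb3, hb4⟩ <;>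
    rcases hsc with ⟨hs, hsall⟩ | ⟨hs1, hs2, hs3, hs4⟩
  · rw [hb, hs]
  · exact absurd (AtoS _ _ (by omega) le_rfl (by omega) hs3) (hball _ (by omega) hs2)
  · rcases StoA _ (by omega) (by omega) hb3 with ⟨k, hk1, hk2, hk3⟩
    exact absurd hk3 (hsall k (by omega) (by omega))
  · have hSB : pvScan arr x (PySem.List.pyRange (n - 1) i (-1)) ≤
        pvBS suf x (i + 1) (n - 1) (-1) := by
      by_contra hc
      exact hb4 _ (by omega) hs2 (AtoS _ _ (by omega) le_rfl (by omega) hs3)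
    rcases StoA _ (by omega) (by omega) hb3 with ⟨k, hk1, hk2, hk3⟩
    have hkS : k ≤ pvScan arr x (PySem.List.pyRange (n - 1) i (-1)) := by
      by_contra hc
      exact hs4 k (by omega) (by omega) hk3
    omega

-- ===== VERDICT (by name: the statement is the Claim_ definition above) =====
theorem farMin_spec : Claim_equal_farMin := by
  intro arr _ hpre
  unfold Spec_farMin
  have hpos : 0 < arr.length := List.length_pos_iff.mpr hpre
  have hA : farMin arr =
      PySem.List.pySetD
        ((PySem.List.pyRange 0 ((arr.length : Int) - 1) 1).foldl
          (fun acc i => PySem.List.pySetD acc i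
            (pvBS (pvSuf arr) (PySem.List.pyGetD arr i 0) (i + 1) ((arr.length : Int) - 1) (-1)))
          (List.replicate arr.length (-1))) (-1) (-1) := rfl
  have hB : farMin_alt arr =
      (PySem.List.pyRange 0 (arr.length : Int) 1).map
        (fun i => pvScan arr (PySem.List.pyGetD arr i 0)
          (PySem.List.pyRange ((arr.length : Int) - 1) i (-1))) := by
    show (PySem.List.pyRange 0 (arr.length : Int) 1).foldl
        (fun ans i => ans ++ [pvScan arr (PySem.List.pyGetD arr i 0)
          (PySem.List.pyRange ((arr.length : Int) - 1) i (-1))]) [] = _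
    rw [PySem.List.foldl_append_singleton_eq_map]
    rfl
  obtain ⟨sufLen, sufM⟩ := pvSuf_build arr ((arr.length : Int) - 2) arr (by omega) rfl
    (fun j hj0 hja hjn =>
      ⟨⟨j, le_rfl, hjn, rfl⟩,
        fun k hk1 hk2 => by
          have hkj : k = j := by omega
          rw [hkj]⟩)
    (fun j _ _ => rfl)
  obtain ⟨ansLen, ansGet⟩ := pvFoldl_set_spec
    (fun i => pvBS (pvSuf arr) (PySem.List.pyGetD arr i 0) (i + 1) ((arr.length : Int) - 1) (-1))
    ((arr.length : Int) - 1) 0 (List.replicate arr.length (-1)) le_rfl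
    (by rw [List.length_replicate]; omega)
  rw [List.length_replicate] at ansLen
  have hansne : ((PySem.List.pyRange 0 ((arr.length : Int) - 1) 1).foldl
      (fun acc i => PySem.List.pySetD acc i
        (pvBS (pvSuf arr) (PySem.List.pyGetD arr i 0) (i + 1) ((arr.length : Int) - 1) (-1)))
      (List.replicate arr.length (-1))) ≠ [] := by
    intro hnil
    rw [hnil] at ansLen
    simp at ansLen
    omega
  rw [hA, hB, pvSetD_neg_one _ _ hansne]
  apply List.ext_getElem
  · rw [List.length_set, ansLen, List.length_map, PySem.List.length_pyRange_one]
    omega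
  · intro k hk1 hk2
    rw [List.length_set, ansLen] at hk1
    have hRHS : ((PySem.List.pyRange 0 (arr.length : Int) 1).map
        (fun i => pvScan arr (PySem.List.pyGetD arr i 0)
          (PySem.List.pyRange ((arr.length : Int) - 1) i (-1))))[k] =
        pvScan arr (PySem.List.pyGetD arr (k : Int) 0)
          (PySem.List.pyRange ((arr.length : Int) - 1) (k : Int) (-1)) := by
      have hg := PySem.List.pyGetD_map_pyRange
        (fun i => pvScan arr (PySem.List.pyGetD arr i 0)
          (PySem.List.pyRange ((arr.length : Int) - 1) i (-1))) arr.length k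
        0 hk1
      rw [PySem.List.pyGetD_eq_getElem _ _ (by omega)
        (by rw [List.length_map, PySem.List.length_pyRange_one]; omega)] at hg
      simp only [Int.toNat_natCast] at hg
      exact hg
    rw [hRHS, List.getElem_set]
    by_cases hlast : k = arr.length - 1
    · rw [if_pos (by omega)]
      have hcast : ((k : Int)) = (arr.length : Int) - 1 := by omega
      rw [hcast, pvRange_neg_one_nil _ _ le_rfl]
      rfl
    · rw [if_neg (by omega)]
      have hget := ansGet (k : Int) (by omega)
      rw [if_pos ⟨by omega, by omega⟩] at hget
      rw [PySem.List.pyGetD_eq_getElem _ _ (by omega) (by rw [ansLen]; omega)] at hget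
      simp only [Int.toNat_natCast] at hget
      rw [hget]
      exact pvBridge arr (pvSuf arr) (k : Int) (by omega) (by omega) sufM

theorem farMin_raises : Claim_raises_farMin := by
  unfold Claim_raises_farMin
  exact ⟨by intro arr _ h hp; exact hp h, by decide⟩

-- self-check: the raise witness really lies in Raises_ and B's port returns the stated literal there
theorem pvRaiseWitness_ok :
    Raises_farMin pvRaiseWitness_farMin ∧
      farMin_alt pvRaiseWitness_farMin = pvRaiseWitnessOut_farMin :=
  ⟨farMin_raises.2.2.1, farMin_raises.2.2.2⟩
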